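-- pv_equiv track=rewrite | github.com/oldmantran/agile-backlog-automation | utils/vision_quality_assessor.py | _check_element_depth
-- ===== SOURCE A (Python) =====
-- from typing import Dict, List, Tuple, Optional
--
-- def _check_element_depth(text: str, keywords: List[str]) -> bool:
--     """Check if keywords are supported by substantial content."""
--     for keyword in keywords:
--         # Find sentences containing the keyword
--         sentences = [s for s in text.split('.') if keyword in s.lower()]
--         for sentence in sentences:
--             # Check if sentence has meaningful content (more than just the keyword)
--             words = sentence.split()
--             if len(words) > 10:  # Substantial sentence
--                 return True
--     return False
-- ===== SOURCE B (Python) =====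
-- from typing import List
--
-- def _check_element_depth(text: str, keywords: List[str]) -> bool:
--     """Check if keywords are supported by substantial content."""
--     low = text.lower()
--     while True:
--         sentence, sep, rest = low.partition('.')
--         if _word_count(sentence) > 10 and any(kw in sentence for kw in keywords):
--             return True
--         if not sep:
--             return False
--         low = rest
--
-- def _word_count(s: str) -> int:
--     """Number of whitespace-separated words, counted by a single state-machine pass."""
--     n = 0
--     in_word = False
--     for ch in s:
--         if ch.isspace():
--             in_word = False
--         elif not in_word:
--             n += 1
--             in_word = True
--     return n
-- ===== Notes on version B (the rewrite author's own statement) =====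
-- stated objective: alternative
-- what changed: B lowercases the text once and makes one streaming pass that peels off one '.'-sentence at a time (str.partition) with early exit, counting words with an explicit in_word/count state machine instead of len(split()), whereas A re-splits the whole text, re-lowercases every sentence and re-splits its words once per keyword.
import Mathlib
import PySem

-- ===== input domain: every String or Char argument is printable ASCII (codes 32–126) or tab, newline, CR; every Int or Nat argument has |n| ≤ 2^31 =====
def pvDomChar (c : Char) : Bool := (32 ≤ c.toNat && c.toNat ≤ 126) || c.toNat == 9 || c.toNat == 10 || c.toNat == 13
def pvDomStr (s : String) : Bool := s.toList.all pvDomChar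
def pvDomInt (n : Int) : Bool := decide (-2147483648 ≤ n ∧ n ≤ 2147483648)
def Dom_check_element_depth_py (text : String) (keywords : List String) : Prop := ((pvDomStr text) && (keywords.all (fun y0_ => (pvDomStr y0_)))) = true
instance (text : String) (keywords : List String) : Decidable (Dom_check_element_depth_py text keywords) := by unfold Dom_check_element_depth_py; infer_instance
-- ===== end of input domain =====

-- B lowers the text once, then makes a single streaming pass: it peels off one '.'-sentence at a
-- time (partition) and counts its words with a state machine, returning early on the first
-- substantial sentence containing a keyword; A re-splits, re-lowers and re-splits words per keyword. Objective: alternative decomposition.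


-- ===== PORT A =====
-- for keyword in keywords: sentences = [s for s in text.split('.') if keyword in s.lower()];
--   for sentence in sentences: if len(sentence.split()) > 10: return True
-- return False     ('.'.split? always returns some since sep ≠ "")
def check_element_depth_py (text : String) (keywords : List String) : Bool :=
  keywords.any (fun keyword =>
    let sentences :=
      ((PySem.Str.split? text ".").getD []).filter
        (fun s => PySem.Str.isIn keyword (PySem.Str.lower s))
    sentences.any (fun sentence => (PySem.Str.split₀ sentence).length > 10))

-- ===== PORT B =====
-- _word_count: n = 0; in_word = False; for ch in s: space -> in_word = False;
--   elif not in_word: n += 1; in_word = True.   State (n, in_word), one fold over the chars.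
def pvWordStep (st : Nat × Bool) (c : Char) : Nat × Bool :=
  if PySem.Chars.isspace c then (st.1, false)
  else if st.2 then st
  else (st.1 + 1, true)

def pvWordCount (s : List Char) : Nat := (s.foldl pvWordStep (0, false)).1

-- the while loop: sentence, sep, rest = low.partition('.')  — partition is ported by hand
-- (exact): sentence = chars before the first '.', sep empty iff no '.' (sentence is all of low),
-- rest = what follows the first '.'.
def pvScan (keywords : List String) (low : List Char) : Bool :=
  let sentence := low.takeWhile (fun c => c != '.')
  if pvWordCount sentence > 10 && keywords.any (fun kw => PySem.Chars.isIn kw.toList sentence) then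
    true
  else if sentence.length = low.length then false
  else pvScan keywords (low.drop (sentence.length + 1))
termination_by low.length
decreasing_by
  have hle : sentence.length ≤ low.length := List.IsPrefix.length_le (List.takeWhile_prefix _)
  simp only [List.length_drop]
  omega

-- low = text.lower(); loop over low
def check_element_depth_py_alt (text : String) (keywords : List String) : Bool :=
  pvScan keywords (PySem.Str.lower text).toList

-- ===== PRECONDITION & SPEC =====
def Spec_check_element_depth_py (text : String) (keywords : List String) (out : Bool) : Prop := out = check_element_depth_py_alt text keywords
instance (text : String) (keywords : List String) (out : Bool) : Decidable (Spec_check_element_depth_py text keywords out) := by unfold Spec_check_element_depth_py; infer_instance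

-- ===== CLAIM (what is proved, stated in full; the proofs are below) =====
def Claim_equal_check_element_depth_py : Prop := ∀ (text : String) (keywords : List String), Dom_check_element_depth_py text keywords → Spec_check_element_depth_py text keywords (check_element_depth_py text keywords)

-- ===== LEMMAS AND PROOFS =====

-- splitting on '.' as a simple structural peel (proof-side mirror of text.split('.'))
def pvSplitDot (cs : List Char) : List (List Char) :=
  if (cs.takeWhile (fun c => c != '.')).length = cs.length then [cs.takeWhile (fun c => c != '.')]
  else cs.takeWhile (fun c => c != '.') ::
    pvSplitDot (cs.drop ((cs.takeWhile (fun c => c != '.')).length + 1))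
termination_by cs.length
decreasing_by
  have hle : (cs.takeWhile (fun c => c != '.')).length ≤ cs.length :=
    List.IsPrefix.length_le (List.takeWhile_prefix _)
  simp only [List.length_drop]
  omega

def pvModHead (f : List Char → List Char) : List (List Char) → List (List Char)
  | [] => []
  | x :: xs => f x :: xs

-- word-count recursion used to relate the fold to split₀
def pvWC : List Char → Bool → Nat
  | [], _ => 0
  | c :: r, iw => if PySem.Chars.isspace c then pvWC r false else (if iw then 0 else 1) + pvWC r true

theorem pvSplitDot_nil : pvSplitDot [] = [[]] := by
  rw [pvSplitDot.eq_def]; simp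

theorem pvSplitDot_cons_dot (rest : List Char) :
    pvSplitDot ('.' :: rest) = [] :: pvSplitDot rest := by
  conv_lhs => rw [pvSplitDot.eq_def]
  simp

theorem pvSplitDot_cons_ne (c : Char) (rest : List Char) (hc : c ≠ '.') :
    pvSplitDot (c :: rest) = pvModHead (fun x => c :: x) (pvSplitDot rest) := by
  have hp : (c != '.') = true := by simp [hc]
  conv_lhs => rw [pvSplitDot.eq_def]
  conv_rhs => rw [pvSplitDot.eq_def]
  by_cases h : (rest.takeWhile (fun c => c != '.')).length = rest.length <;>
    simp [hp, h, pvModHead]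

theorem pvGo_dot (fuel : Nat) : ∀ (l cur : List Char) (accs : List (List Char)),
    l.length < fuel →
    PySem.Chars.splitOn.go ['.'] fuel l cur accs
      = accs.reverse ++ pvModHead (fun x => cur.reverse ++ x) (pvSplitDot l) := by
  induction fuel with
  | zero => intro l cur accs h; omega
  | succ f ih =>
    intro l cur accs h
    cases l with
    | nil => simp [PySem.Chars.splitOn.go, pvSplitDot_nil, pvModHead]
    | cons c rest =>
      by_cases hc : c = '.'
      · subst hc
        have hpre : List.isPrefixOf ['.'] ('.' :: rest) = true := by
          simp [List.isPrefixOf]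
        rw [PySem.Chars.splitOn.go]
        simp only [hpre, if_true]
        rw [show List.drop (['.'] : List Char).length ('.' :: rest) = rest from rfl]
        rw [ih rest [] _ (by simp at h ⊢; omega)]
        rw [pvSplitDot_cons_dot]
        cases pvSplitDot rest <;> simp [pvModHead]
      · have hpre : List.isPrefixOf ['.'] (c :: rest) = false := by
          simp [List.isPrefixOf]
          exact fun h' => hc h'.symm
        rw [PySem.Chars.splitOn.go]
        simp only [hpre, Bool.false_eq_true, if_false]
        rw [ih rest (c :: cur) accs (by simp at h ⊢; omega)]
        rw [pvSplitDot_cons_ne c rest hc]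
        cases pvSplitDot rest <;> simp [pvModHead]

theorem pvSplitOn_dot (cs : List Char) : PySem.Chars.splitOn cs ['.'] = pvSplitDot cs := by
  have h := pvGo_dot (cs.length + 1) cs [] [] (by omega)
  rw [PySem.Chars.splitOn]
  rw [h]
  cases pvSplitDot cs <;> simp [pvModHead]

theorem pvScan_eq_any (keywords : List String) (low : List Char) :
    pvScan keywords low =
      (pvSplitDot low).any (fun s =>
        decide (pvWordCount s > 10) && keywords.any (fun kw => PySem.Chars.isIn kw.toList s)) := by
  suffices H : ∀ (n : Nat) (low : List Char), low.length ≤ n →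
      pvScan keywords low =
        (pvSplitDot low).any (fun s =>
          decide (pvWordCount s > 10) && keywords.any (fun kw => PySem.Chars.isIn kw.toList s)) by
    exact H low.length low le_rfl
  intro n
  induction n with
  | zero =>
    intro low hl
    have hnil : low = [] := List.eq_nil_of_length_eq_zero (Nat.le_zero.mp hl)
    subst hnil
    rw [pvScan.eq_def, pvSplitDot_nil]
    simp [pvWordCount]
  | succ n ih =>
    intro low hl
    rw [pvScan.eq_def, pvSplitDot.eq_def]
    show (if (decide (pvWordCount (List.takeWhile (fun c => c != '.') low) > 10)
            && keywords.any fun kw =>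
                 PySem.Chars.isIn kw.toList (List.takeWhile (fun c => c != '.') low)) = true then
        true
      else if (List.takeWhile (fun c => c != '.') low).length = low.length then false
      else pvScan keywords (List.drop ((List.takeWhile (fun c => c != '.') low).length + 1) low)) =
      (if (List.takeWhile (fun c => c != '.') low).length = low.length then
          [List.takeWhile (fun c => c != '.') low]
        else List.takeWhile (fun c => c != '.') low ::
          pvSplitDot (List.drop ((List.takeWhile (fun c => c != '.') low).length + 1) low)).any
        fun s => decide (pvWordCount s > 10) && keywords.any fun kw => PySem.Chars.isIn kw.toList s
    have hsl : (low.takeWhile (fun c => c != '.')).length ≤ low.length :=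
      List.IsPrefix.length_le (List.takeWhile_prefix _)
    split_ifs with h1 h2 h2
    · simp [h1]
    · simp [h1]
    · rw [Bool.not_eq_true] at h1
      simp [h1]
    · rw [Bool.not_eq_true] at h1
      simp only [List.any_cons, h1, Bool.false_or]
      exact ih _ (by simp only [List.length_drop]; omega)

theorem pvWC_foldl (l : List Char) : ∀ (n : Nat) (iw : Bool),
    (l.foldl pvWordStep (n, iw)).1 = n + pvWC l iw := by
  induction l with
  | nil => intro n iw; simp [pvWC]
  | cons c r ih =>
    intro n iw
    by_cases hs : PySem.Chars.isspace c <;> cases iw <;>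
      simp [pvWordStep, pvWC, hs, ih] <;> omega

theorem pvWordCount_eq (s : List Char) : pvWordCount s = pvWC s false := by
  simpa [pvWordCount] using pvWC_foldl s 0 false

theorem pvSplit₀_go_len (l : List Char) : ∀ (cur : List Char) (acc : List (List Char)),
    (PySem.Chars.split₀.go l cur acc).length
      = acc.length + (if cur.isEmpty then 0 else 1) + pvWC l (!cur.isEmpty) := by
  induction l with
  | nil =>
    intro cur acc
    by_cases hc : cur.isEmpty <;> simp [PySem.Chars.split₀.go, hc, pvWC]
  | cons c r ih =>
    intro cur acc
    by_cases hs : PySem.Chars.isspace c <;> by_cases hc : cur.isEmpty <;>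
      simp [PySem.Chars.split₀.go, hs, hc, pvWC, ih] <;> omega

theorem pvSplit₀_len (s : List Char) : (PySem.Chars.split₀ s).length = pvWC s false := by
  simpa [PySem.Chars.split₀] using pvSplit₀_go_len s [] []

theorem pvUpper_toNat (c : Char) (h : PySem.Chars.isupper c = true) :
    65 ≤ c.toNat ∧ c.toNat ≤ 90 := by
  have h' : 'A' ≤ c ∧ c ≤ 'Z' := by simpa [PySem.Chars.isupper] using h
  exact ⟨Nat.succ_le_of_lt h'.1, h'.2⟩

theorem pvLowerChar_toNat (c : Char) (h : PySem.Chars.isupper c = true) :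
    (PySem.Chars.lowerChar c).toNat = c.toNat + 32 := by
  obtain ⟨h1, h2⟩ := pvUpper_toNat c h
  have hv : (c.toNat + 32).isValidChar := Or.inl (by omega)
  simp [PySem.Chars.lowerChar, h, Char.toNat_ofNat, hv]

theorem pvLowerChar_bne_dot (c : Char) : (PySem.Chars.lowerChar c != '.') = (c != '.') := by
  by_cases h : PySem.Chars.isupper c
  · obtain ⟨h1, h2⟩ := pvUpper_toNat c h
    have hl := pvLowerChar_toNat c h
    have h3 : PySem.Chars.lowerChar c ≠ '.' := by
      intro heq
      have h5 : (PySem.Chars.lowerChar c).toNat = ('.' : Char).toNat := by rw [heq]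
      rw [hl, show ('.' : Char).toNat = 46 from rfl] at h5
      omega
    have h4 : c ≠ '.' := by
      intro heq
      subst heq
      rw [show ('.' : Char).toNat = 46 from rfl] at h1
      omega
    rw [Bool.eq_iff_iff]
    simp [bne_iff_ne, h3, h4]
  · rw [show PySem.Chars.lowerChar c = c from by
      unfold PySem.Chars.lowerChar; rw [if_neg h]]

theorem pvIsspace_lowerChar (c : Char) :
    PySem.Chars.isspace (PySem.Chars.lowerChar c) = PySem.Chars.isspace c := by
  by_cases h : PySem.Chars.isupper c
  · obtain ⟨h1, h2⟩ := pvUpper_toNat c h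
    have hl := pvLowerChar_toNat c h
    rw [Bool.eq_iff_iff]
    simp only [PySem.Chars.isspace, hl, Bool.or_eq_true, Bool.and_eq_true, decide_eq_true_eq]
    omega
  · rw [show PySem.Chars.lowerChar c = c from by
      unfold PySem.Chars.lowerChar; rw [if_neg h]]

theorem pvWC_map_lower (l : List Char) : ∀ iw, pvWC (l.map PySem.Chars.lowerChar) iw = pvWC l iw := by
  induction l with
  | nil => intro iw; simp [pvWC]
  | cons c r ih =>
    intro iw
    by_cases hs : PySem.Chars.isspace c <;>
      simp [pvWC, pvIsspace_lowerChar, hs, ih]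

theorem pvTakeWhile_map_lower (l : List Char) :
    (l.map PySem.Chars.lowerChar).takeWhile (fun c => c != '.')
      = (l.takeWhile (fun c => c != '.')).map PySem.Chars.lowerChar := by
  rw [List.takeWhile_map]
  have hfun : ((fun c => c != '.') ∘ PySem.Chars.lowerChar) = (fun c => c != '.') := by
    funext c
    exact pvLowerChar_bne_dot c
  rw [hfun]

theorem pvSplitDot_map_lower (l : List Char) :
    pvSplitDot (l.map PySem.Chars.lowerChar) = (pvSplitDot l).map (List.map PySem.Chars.lowerChar) := by
  suffices H : ∀ (n : Nat) (l : List Char), l.length ≤ n →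
      pvSplitDot (l.map PySem.Chars.lowerChar) = (pvSplitDot l).map (List.map PySem.Chars.lowerChar) by
    exact H l.length l le_rfl
  intro n
  induction n with
  | zero =>
    intro l hl
    have hnil : l = [] := List.eq_nil_of_length_eq_zero (Nat.le_zero.mp hl)
    subst hnil
    simp [pvSplitDot_nil]
  | succ n ih =>
    intro l hl
    conv_lhs => rw [pvSplitDot.eq_def]
    conv_rhs => rw [pvSplitDot.eq_def]
    have hsl : (l.takeWhile (fun c => c != '.')).length ≤ l.length :=
      List.IsPrefix.length_le (List.takeWhile_prefix _)
    simp only [pvTakeWhile_map_lower, List.length_map]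
    split_ifs with h2
    · simp
    · simp only [List.map_cons]
      rw [← List.map_drop, ih _ (by simp only [List.length_drop]; omega)]

theorem pvA_eq (text : String) (keywords : List String) :
    check_element_depth_py text keywords
      = keywords.any (fun kw =>
          ((pvSplitDot text.toList).filter
              (fun s => PySem.Chars.isIn kw.toList (PySem.Chars.lower s))).any
            (fun s => decide ((PySem.Chars.split₀ s).length > 10))) := by
  unfold check_element_depth_py
  have hd : (PySem.Str.split? text ".").getD []
      = (pvSplitDot text.toList).map String.ofList := by
    simp [PySem.Str.split?, PySem.Chars.split?, pvSplitOn_dot,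
      show (("." : String)).toList = ['.'] from rfl]
  rw [hd]
  simp only [List.filter_map, List.any_map, Function.comp_def,
    PySem.Str.isIn, PySem.Str.lower, PySem.Str.split₀, String.toList_ofList, List.length_map]

theorem pvB_eq (text : String) (keywords : List String) :
    check_element_depth_py_alt text keywords
      = (pvSplitDot text.toList).any (fun s =>
          decide ((PySem.Chars.split₀ s).length > 10)
            && keywords.any (fun kw => PySem.Chars.isIn kw.toList (PySem.Chars.lower s))) := by
  unfold check_element_depth_py_alt
  rw [pvScan_eq_any]
  have hlow : (PySem.Str.lower text).toList = text.toList.map PySem.Chars.lowerChar := by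
    simp [PySem.Str.lower, String.toList_ofList, PySem.Chars.lower]
  rw [hlow, pvSplitDot_map_lower, List.any_map]
  simp only [Function.comp_def, pvWordCount_eq, pvWC_map_lower, pvSplit₀_len, PySem.Chars.lower]

-- ===== VERDICT (by name: the statement is the Claim_ definition above) =====
theorem check_element_depth_py_spec : Claim_equal_check_element_depth_py := by
  intro text keywords _
  unfold Spec_check_element_depth_py
  rw [pvA_eq, pvB_eq]
  rw [Bool.eq_iff_iff]
  simp only [List.any_eq_true, List.mem_filter, Bool.and_eq_true, decide_eq_true_eq]
  constructor
  · rintro ⟨k, hk, s, ⟨hs, hin⟩, hlen⟩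
    exact ⟨s, hs, hlen, k, hk, hin⟩
  · rintro ⟨s, hs, hlen, k, hk, hin⟩
    exact ⟨k, hk, s, ⟨hs, hin⟩, hlen⟩
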